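-- pv_equiv track=rewrite | github.com/elifinfr/vel-satis-reprog | testcandidate.py | candidate_6
-- ===== SOURCE A (Python) =====
-- def candidate_6(seed):
--     # Pattern Denso 16bit LFSR avec constante 0x86E7
--     key = seed
--     for _ in range(16):
--         if key & 0x8000:
--             key = ((key << 1) ^ 0x86E7) & 0xFFFF
--         else:
--             key = (key << 1) & 0xFFFF
--     return key
-- ===== SOURCE B (Python) =====
-- def _build_table():
--     table = []
--     for b in range(256):
--         r = b << 8
--         for _ in range(8):
--             r = ((r << 1) & 0xFFFF) ^ (0x86E7 if r & 0x8000 else 0)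
--         table.append(r)
--     return table
--
-- _TABLE = _build_table()
--
-- def candidate_6(seed):
--     # byte-at-a-time: two 8-bit strides through the 256-entry table
--     key = seed
--     for _ in range(2):
--         key = ((key << 8) ^ _TABLE[(key >> 8) & 0xFF]) & 0xFFFF
--     return key
-- ===== Notes on version B (the rewrite author's own statement) =====
-- stated objective: alternative
-- what changed: B advances the 16-bit LFSR a byte at a time: it precomputes a 256-entry table (entry b = the 8-step shift/XOR run from b<<8, built by a loop at module load) and replaces A's 16 single-bit rounds by two table-lookup strides.
import Mathlib
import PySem

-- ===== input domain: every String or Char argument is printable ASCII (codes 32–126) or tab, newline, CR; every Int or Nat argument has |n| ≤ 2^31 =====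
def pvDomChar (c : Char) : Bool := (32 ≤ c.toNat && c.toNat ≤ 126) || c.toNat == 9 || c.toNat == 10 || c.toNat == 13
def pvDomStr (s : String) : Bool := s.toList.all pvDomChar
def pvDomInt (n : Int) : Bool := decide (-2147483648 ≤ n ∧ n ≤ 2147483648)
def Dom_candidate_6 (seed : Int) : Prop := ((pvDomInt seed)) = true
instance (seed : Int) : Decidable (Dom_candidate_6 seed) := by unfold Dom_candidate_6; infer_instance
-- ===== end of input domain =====

set_option maxRecDepth 10000

-- B replaces A's 16 single-bit LFSR rounds by two byte-sized strides through a
-- 256-entry table built once by the same 8-step shift/XOR rule (alternative decomposition).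

-- ===== PORT A =====
def candidate_6 (seed : Int) : Int :=
  (List.range 16).foldl (fun key _ =>
      if PySem.Int.band key 0x8000 ≠ 0 then
        PySem.Int.band (PySem.Int.bxor (key <<< (1:Nat)) 0x86E7) 0xFFFF
      else
        PySem.Int.band (key <<< (1:Nat)) 0xFFFF) seed

-- ===== PORT B =====
-- _build_table: entry b is the 8-step run of the shift/XOR rule started from b << 8
def pvTable : List Int :=
  (List.range 256).map (fun b =>
    (List.range 8).foldl (fun r _ =>
        PySem.Int.bxor (PySem.Int.band (r <<< (1:Nat)) 0xFFFF)
          (if PySem.Int.band r 0x8000 ≠ 0 then 0x86E7 else 0)) (((b : Nat) : Int) <<< (8:Nat)))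

def candidate_6_alt (seed : Int) : Int :=
  (List.range 2).foldl (fun key _ =>
      PySem.Int.band
        (PySem.Int.bxor (key <<< (8:Nat))
          (pvTable.getD (PySem.Int.band (key >>> (8:Nat)) 0xFF).toNat 0))
        0xFFFF) seed

-- ===== PRECONDITION & SPEC =====
def Spec_candidate_6 (seed : Int) (out : Int) : Prop := out = candidate_6_alt seed
instance (seed : Int) (out : Int) : Decidable (Spec_candidate_6 seed out) := by unfold Spec_candidate_6; infer_instance

-- ===== CLAIM (what is proved, stated in full; the proofs are below) =====
def Claim_equal_candidate_6 : Prop := ∀ (seed : Int), Dom_candidate_6 seed → Spec_candidate_6 seed (candidate_6 seed)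

-- ===== LEMMAS AND PROOFS =====

-- Nat-level model of the one-bit LFSR step, its table, and the byte stride
def pvStepN (k : Nat) : Nat :=
  if k &&& 0x8000 ≠ 0 then ((k <<< 1) ^^^ 0x86E7) &&& 0xFFFF else (k <<< 1) &&& 0xFFFF

def pvTableN : List Nat := (List.range 256).map (fun b => pvStepN^[8] (b <<< 8))

def pvStrideN (x : Nat) : Nat :=
  ((x <<< 8) &&& 0xFFFF) ^^^ pvTableN.getD ((x >>> 8) &&& 0xFF) 0

theorem pv_sub_and (m n : Nat) : m - (m &&& n) = m.ldiff n := by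
  induction m using Nat.binaryRec generalizing n with
  | zero => simp [Nat.ldiff, Nat.bitwise_zero_left]
  | bit b m ih =>
    cases n using Nat.bitCasesOn with
    | bit b' n' =>
      rw [Nat.land_bit, Nat.ldiff_bit]
      have h1 : m &&& n' ≤ m := Nat.and_le_left
      have h2 := ih n'
      simp only [Nat.bit_val]
      cases b <;> cases b' <;>
        simp only [Bool.and_true, Bool.and_false, Bool.not_true, Bool.not_false,
          Bool.toNat_true, Bool.toNat_false] <;> omega

theorem pv_compl_testBit (x i : Nat) :
    (65535 - x % 65536).testBit i = (decide (i < 16) && !x.testBit i) := by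
  have h1 : x % 65536 = 65535 &&& x := by
    rw [Nat.land_comm]
    have := Nat.and_two_pow_sub_one_eq_mod x 16
    norm_num at this ⊢
    omega
  rw [h1, pv_sub_and, Nat.testBit_ldiff]
  have h2 : (65535 : Nat).testBit i = decide (i < 16) := by
    have := Nat.testBit_two_pow_sub_one 16 i
    norm_num at this
    exact this
  rw [h2]

theorem pv_negSucc_emod (n : Nat) : ((Int.negSucc n) % 65536).toNat = 65535 - n % 65536 := by
  rw [Int.negSucc_eq]
  omega

theorem pv_negSucc_emod8 (n : Nat) : ((Int.negSucc n) % 256).toNat = 255 - n % 256 := by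
  rw [Int.negSucc_eq]; omega

theorem pv_band_ffff (a : Int) : PySem.Int.band a 0xFFFF = ((a % 65536).toNat : Int) := by
  rcases a with n | n
  · rw [show ((Int.ofNat n)) = ((n:Nat):Int) from rfl,
      show ((0xFFFF:Int)) = ((65535:Nat):Int) from rfl, PySem.Int.band_natCast]
    have h : n &&& 65535 = n % 65536 := by
      have := Nat.and_two_pow_sub_one_eq_mod n 16
      norm_num at this; exact this
    rw [h]; omega
  · simp only [PySem.Int.band]
    rw [if_neg (by exact not_le.mpr (Int.negSucc_lt_zero n)), if_pos (by norm_num)]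
    have h1 : (-(Int.negSucc n) - 1) = (n : Int) := by rw [Int.negSucc_eq]; ring
    rw [h1]
    have h2 : (65535 : Int).toNat = 65535 := rfl
    have h3 : ((n : Int)).toNat = n := rfl
    rw [show ((0xFFFF:Int)) = (65535:Int) from rfl, h2, h3, pv_negSucc_emod]
    have h4 : 65535 &&& n = n % 65536 := by
      rw [Nat.land_comm]
      have := Nat.and_two_pow_sub_one_eq_mod n 16
      norm_num at this; exact this
    rw [h4]

theorem pv_band_ff (a : Int) : PySem.Int.band a 0xFF = ((a % 256).toNat : Int) := by
  rcases a with n | n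
  · rw [show ((Int.ofNat n)) = ((n:Nat):Int) from rfl,
      show ((0xFF:Int)) = ((255:Nat):Int) from rfl, PySem.Int.band_natCast]
    have h : n &&& 255 = n % 256 := by
      have := Nat.and_two_pow_sub_one_eq_mod n 8
      norm_num at this; exact this
    rw [h]; omega
  · simp only [PySem.Int.band]
    rw [if_neg (by exact not_le.mpr (Int.negSucc_lt_zero n)), if_pos (by norm_num)]
    have h1 : (-(Int.negSucc n) - 1) = (n : Int) := by rw [Int.negSucc_eq]; ring
    rw [h1]
    rw [show ((0xFF:Int)) = (255:Int) from rfl, show (255:Int).toNat = 255 from rfl,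
      show ((n : Int)).toNat = n from rfl, pv_negSucc_emod8]
    have h4 : 255 &&& n = n % 256 := by
      rw [Nat.land_comm]
      have := Nat.and_two_pow_sub_one_eq_mod n 8
      norm_num at this; exact this
    rw [h4]
theorem pv_band_8000 (a : Int) :
    (PySem.Int.band a 0x8000 ≠ 0) ↔ ((a % 65536).toNat.testBit 15 = true) := by
  rcases a with n | n
  · rw [show ((Int.ofNat n)) = ((n:Nat):Int) from rfl,
      show ((0x8000:Int)) = ((32768:Nat):Int) from rfl, PySem.Int.band_natCast]
    have h : n &&& 32768 = (n.testBit 15).toNat * 32768 := by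
      have := Nat.and_two_pow n 15
      norm_num at this; exact this
    have h2 : ((n:Int) % 65536).toNat = n % 65536 := by omega
    have tb : (n % 65536).testBit 15 = n.testBit 15 := by
      have := Nat.testBit_mod_two_pow n 16 15
      norm_num at this; exact this
    rw [h, h2, tb]
    cases n.testBit 15 <;> simp
  · simp only [PySem.Int.band]
    rw [if_neg (by exact not_le.mpr (Int.negSucc_lt_zero n)), if_pos (by norm_num)]
    have h1 : (-(Int.negSucc n) - 1) = (n : Int) := by rw [Int.negSucc_eq]; ring
    rw [h1, pv_negSucc_emod, pv_compl_testBit,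
      show ((0x8000:Int)) = (32768:Int) from rfl, show (32768:Int).toNat = 32768 from rfl,
      show ((n : Int)).toNat = n from rfl]
    have h : 32768 &&& n = 32768 * (n.testBit 15).toNat := by
      have := Nat.two_pow_and n 15
      norm_num at this; exact this
    rw [h]
    cases n.testBit 15 <;> simp

theorem pv_bxor_band (a : Int) (c : Nat) (hc : c < 65536) :
    PySem.Int.band (PySem.Int.bxor a (c : Int)) 0xFFFF
      = (((a % 65536).toNat ^^^ c : Nat) : Int) := by
  rcases a with n | n
  · rw [show ((Int.ofNat n)) = ((n:Nat):Int) from rfl, PySem.Int.bxor_natCast, pv_band_ffff]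
    have h2 : (((n ^^^ c : Nat) : Int) % 65536).toNat = (n ^^^ c) % 65536 := by omega
    have h3 : ((n:Int) % 65536).toNat = n % 65536 := by omega
    rw [h2, h3]
    congr 1
    apply Nat.eq_of_testBit_eq
    intro i
    by_cases h16 : i < 16
    · have t1 := Nat.testBit_mod_two_pow (n ^^^ c) 16 i
      have t2 := Nat.testBit_mod_two_pow n 16 i
      norm_num at t1 t2
      simp [t1, t2, Nat.testBit_xor, h16]
    · have hcb : c.testBit i = false := by
        apply Nat.testBit_eq_false_of_lt
        calc c < 2^16 := hc
          _ ≤ 2^i := Nat.pow_le_pow_right (by norm_num) (by omega)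
      have t1 := Nat.testBit_mod_two_pow (n ^^^ c) 16 i
      have t2 := Nat.testBit_mod_two_pow n 16 i
      norm_num at t1 t2
      simp [t1, t2, Nat.testBit_xor, h16, hcb]
  · have hx : PySem.Int.bxor (Int.negSucc n) (c : Int) = Int.negSucc (n ^^^ c) := by
      simp only [PySem.Int.bxor]
      rw [if_neg (by exact not_le.mpr (Int.negSucc_lt_zero n)), if_pos (by positivity)]
      have h1 : (-(Int.negSucc n) - 1) = (n : Int) := by rw [Int.negSucc_eq]; ring
      rw [h1, show ((n:Int)).toNat = n from rfl, show ((c:Int)).toNat = c from rfl,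
        Int.negSucc_eq]
      ring
    rw [hx, pv_band_ffff, pv_negSucc_emod, pv_negSucc_emod]
    congr 1
    apply Nat.eq_of_testBit_eq
    intro i
    simp only [Nat.testBit_xor, pv_compl_testBit]
    by_cases h16 : i < 16
    · have hcb : (65535 - n % 65536).testBit i = !n.testBit i := by
        rw [pv_compl_testBit]; simp [h16]
      simp only [h16, decide_true, Bool.true_and]
      cases n.testBit i <;> cases c.testBit i <;> simp
    · have hcb : c.testBit i = false := by
        apply Nat.testBit_eq_false_of_lt
        calc c < 2^16 := hc
          _ ≤ 2^i := Nat.pow_le_pow_right (by norm_num) (by omega)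
      have hnb : (65535 - n % 65536).testBit i = false := by
        rw [pv_compl_testBit]; simp [h16]
      simp [h16, hcb]

theorem pv_stepN_lt (k : Nat) : pvStepN k < 65536 := by
  unfold pvStepN
  split <;> exact Nat.lt_succ_of_le Nat.and_le_right

theorem pv_iter_lt (j x : Nat) (hx : x < 65536) : pvStepN^[j] x < 65536 := by
  induction j with
  | zero => simpa
  | succ j ih => rw [Function.iterate_succ_apply']; exact pv_stepN_lt _

theorem pv_stepN_eq (z : Nat) :
    pvStepN z = ((z <<< 1) &&& 0xFFFF) ^^^ (if z.testBit 15 then 0x86E7 else 0) := by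
  unfold pvStepN
  have hb : (z &&& 0x8000 ≠ 0) ↔ z.testBit 15 = true := by
    have := Nat.and_two_pow z 15
    norm_num at this
    rw [this]
    cases z.testBit 15 <;> simp
  by_cases h : z.testBit 15 = true
  · rw [if_pos (hb.mpr h), if_pos h]
    apply Nat.eq_of_testBit_eq
    intro i
    simp only [Nat.testBit_and, Nat.testBit_xor]
    by_cases h16 : i < 16
    · have hm : Nat.testBit 65535 i = true := by
        have := Nat.testBit_two_pow_sub_one 16 i
        norm_num at this; simp [this, h16]
      simp [hm]
    · have hm : Nat.testBit 65535 i = false := by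
        have := Nat.testBit_two_pow_sub_one 16 i
        norm_num at this; simp [this]; omega
      have hc : Nat.testBit 34535 i = false := by
        apply Nat.testBit_eq_false_of_lt
        calc (34535:Nat) < 2^16 := by norm_num
          _ ≤ 2^i := Nat.pow_le_pow_right (by norm_num) (by omega)
      simp [hm, hc]
  · rw [if_neg (fun hc => h (hb.mp hc)), if_neg h]
    simp

theorem pv_stepN_linear (u v : Nat) : pvStepN (u ^^^ v) = pvStepN u ^^^ pvStepN v := by
  rw [pv_stepN_eq, pv_stepN_eq, pv_stepN_eq]
  have hs : ((u ^^^ v) <<< 1) &&& 0xFFFF = (((u <<< 1) &&& 0xFFFF) ^^^ ((v <<< 1) &&& 0xFFFF)) := by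
    apply Nat.eq_of_testBit_eq
    intro i
    simp only [Nat.testBit_and, Nat.testBit_xor, Nat.testBit_shiftLeft]
    cases hu : u.testBit (i-1) <;> cases hv : v.testBit (i-1) <;>
      cases hm : Nat.testBit 65535 i <;> cases hd : decide (i ≥ 1) <;> simp
  rw [Nat.testBit_xor, hs]
  cases h1 : u.testBit 15 <;> cases h2 : v.testBit 15 <;>
    simp [Nat.xor_comm, Nat.xor_left_comm]

theorem pv_iterj_linear (j u v : Nat) :
    pvStepN^[j] (u ^^^ v) = pvStepN^[j] u ^^^ pvStepN^[j] v := by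
  induction j with
  | zero => rfl
  | succ j ih =>
    rw [Function.iterate_succ_apply', Function.iterate_succ_apply',
      Function.iterate_succ_apply', ih, pv_stepN_linear]

theorem pv_low_byte : ∀ lo < 256, pvStepN^[8] lo = lo <<< 8 := by decide

theorem pv_decompose (x : Nat) (_hx : x < 65536) : x = ((x >>> 8) <<< 8) ^^^ (x &&& 255) := by
  apply Nat.eq_of_testBit_eq
  intro i
  simp only [Nat.testBit_xor, Nat.testBit_and, Nat.testBit_shiftLeft, Nat.testBit_shiftRight]
  by_cases h : i < 8
  · have h8 : ¬ (i ≥ 8) := by omega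
    have hm : Nat.testBit 255 i = true := by
      have := Nat.testBit_two_pow_sub_one 8 i
      norm_num at this; simp [this, h]
    simp [h8, hm]
  · have h8 : i ≥ 8 := by omega
    have hm : Nat.testBit 255 i = false := by
      have := Nat.testBit_two_pow_sub_one 8 i
      norm_num at this; simp [this]; omega
    simp [h8, hm, Nat.add_sub_cancel' h8]

theorem pv_mask_xor (u c : Nat) (hc : c < 65536) :
    (u ^^^ c) &&& 65535 = (u &&& 65535) ^^^ c := by
  apply Nat.eq_of_testBit_eq
  intro i
  simp only [Nat.testBit_and, Nat.testBit_xor]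
  by_cases h16 : i < 16
  · have hm : Nat.testBit 65535 i = true := by
      have := Nat.testBit_two_pow_sub_one 16 i
      norm_num at this; simp [this, h16]
    simp [hm]
  · have hm : Nat.testBit 65535 i = false := by
      have := Nat.testBit_two_pow_sub_one 16 i
      norm_num at this; simp [this]; omega
    have hcb : c.testBit i = false := by
      apply Nat.testBit_eq_false_of_lt
      calc c < 2^16 := hc
        _ ≤ 2^i := Nat.pow_le_pow_right (by norm_num) (by omega)
    simp [hm, hcb]

theorem pv_shift1 (a : Int) :
    ((a <<< (1:Nat)) % 65536).toNat = ((a % 65536).toNat <<< 1) &&& 65535 := by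
  have h1 : a <<< (1:Nat) = a * 2 := by rw [Int.shiftLeft_eq]; norm_num
  have h2 : (a % 65536).toNat <<< 1 = (a % 65536).toNat * 2 := by
    rw [Nat.shiftLeft_eq]
  have h3 : ∀ m : Nat, m * 2 &&& 65535 = m * 2 % 65536 := by
    intro m
    have := Nat.and_two_pow_sub_one_eq_mod (m * 2) 16
    norm_num at this; exact this
  rw [h1, h2, h3]
  omega

theorem pv_step_bridge (a : Int) :
    (if PySem.Int.band a 0x8000 ≠ 0 then
        PySem.Int.band (PySem.Int.bxor (a <<< (1:Nat)) 0x86E7) 0xFFFF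
      else
        PySem.Int.band (a <<< (1:Nat)) 0xFFFF) = ((pvStepN ((a % 65536).toNat) : Nat) : Int) := by
  have hcond : (PySem.Int.band a 0x8000 ≠ 0) ↔ ((a % 65536).toNat &&& 0x8000 ≠ 0) := by
    rw [pv_band_8000]
    have := Nat.and_two_pow ((a % 65536).toNat) 15
    norm_num at this ⊢
    rw [this]
    cases (a % 65536).toNat.testBit 15 <;> simp
  unfold pvStepN
  by_cases hb : PySem.Int.band a 0x8000 ≠ 0
  · rw [if_pos hb, if_pos (hcond.mp hb),
      show ((0x86E7 : Int)) = ((34535 : Nat) : Int) from rfl,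
      pv_bxor_band _ 34535 (by norm_num), pv_shift1,
      pv_mask_xor _ 34535 (by norm_num)]
  · rw [if_neg hb, if_neg (fun hc => hb (hcond.mpr hc)), pv_band_ffff, pv_shift1]

theorem pv_fold_bridge (j : Nat) (hj : 1 ≤ j) (a : Int) :
    (List.range j).foldl (fun key _ =>
        if PySem.Int.band key 0x8000 ≠ 0 then
          PySem.Int.band (PySem.Int.bxor (key <<< (1:Nat)) 0x86E7) 0xFFFF
        else
          PySem.Int.band (key <<< (1:Nat)) 0xFFFF) a
      = ((pvStepN^[j] ((a % 65536).toNat) : Nat) : Int) := by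
  induction j, hj using Nat.le_induction with
  | base =>
    rw [show List.range 1 = [0] from rfl]
    simp only [List.foldl_cons, List.foldl_nil]
    rw [pv_step_bridge, Function.iterate_one]
  | succ j hj ih =>
    rw [List.range_succ, List.foldl_append, ih]
    simp only [List.foldl_cons, List.foldl_nil]
    rw [pv_step_bridge, Function.iterate_succ_apply']
    have hv : pvStepN^[j] ((a % 65536).toNat) < 65536 :=
      pv_iter_lt _ _ (by omega)
    congr 2
    omega


-- one step of B's table-builder rule, on a 16-bit Nat
theorem pv_step2_bridge (v : Nat) :
    PySem.Int.bxor (PySem.Int.band (((v : Nat) : Int) <<< (1:Nat)) 0xFFFF)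
        (if PySem.Int.band ((v : Nat) : Int) 0x8000 ≠ 0 then 0x86E7 else 0)
      = ((pvStepN v : Nat) : Int) := by
  have hsh : ((v : Int)) <<< (1:Nat) = ((v <<< 1 : Nat) : Int) := by
    rw [Int.shiftLeft_eq, Nat.shiftLeft_eq]
    push_cast; ring
  have hb : PySem.Int.band ((v : Int)) 0x8000 = (((v &&& 32768 : Nat)) : Int) := by
    rw [show ((0x8000:Int)) = ((32768:Nat):Int) from rfl, PySem.Int.band_natCast]
  have hm : PySem.Int.band (((v <<< 1 : Nat)) : Int) 0xFFFF
      = (((v <<< 1) &&& 65535 : Nat) : Int) := by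
    rw [show ((0xFFFF:Int)) = ((65535:Nat):Int) from rfl, PySem.Int.band_natCast]
  rw [hsh, hm, hb]
  unfold pvStepN
  by_cases hc : v &&& 32768 ≠ 0
  · rw [if_pos (by exact_mod_cast hc), if_pos hc,
      show ((0x86E7:Int)) = ((34535:Nat):Int) from rfl, PySem.Int.bxor_natCast,
      pv_mask_xor _ 34535 (by norm_num)]
  · rw [if_neg (by simpa using hc), if_neg hc, PySem.Int.bxor_zero]

theorem pv_fold2_bridge (j v : Nat) :
    (List.range j).foldl (fun r _ =>
        PySem.Int.bxor (PySem.Int.band (r <<< (1:Nat)) 0xFFFF)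
          (if PySem.Int.band r 0x8000 ≠ 0 then 0x86E7 else 0)) ((v : Nat) : Int)
      = ((pvStepN^[j] v : Nat) : Int) := by
  induction j with
  | zero => rfl
  | succ j ih =>
    rw [List.range_succ, List.foldl_append, ih]
    simp only [List.foldl_cons, List.foldl_nil]
    rw [pv_step2_bridge _, Function.iterate_succ_apply']

theorem pv_table_cast (i : Nat) : pvTable.getD i 0 = ((pvTableN.getD i 0 : Nat) : Int) := by
  unfold pvTable pvTableN
  rw [List.getD_eq_getElem?_getD, List.getD_eq_getElem?_getD,
    List.getElem?_map, List.getElem?_map]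
  by_cases hi : i < 256
  · rw [List.getElem?_range hi]
    simp only [Option.map_some, Option.getD_some]
    have hstart : ((i : Nat) : Int) <<< (8:Nat) = (((i <<< 8 : Nat)) : Int) := by
      rw [Int.shiftLeft_eq, Nat.shiftLeft_eq]
      push_cast; ring
    rw [hstart, pv_fold2_bridge 8 _]
  · have hn : (List.range 256)[i]? = none := by simp; omega
    rw [hn]
    rfl

theorem pv_tableN_getD (b : Nat) (hb : b < 256) : pvTableN.getD b 0 = pvStepN^[8] (b <<< 8) := by
  unfold pvTableN
  rw [List.getD_eq_getElem?_getD, List.getElem?_map, List.getElem?_range hb]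
  rfl

theorem pv_tableN_lt (i : Nat) : pvTableN.getD i 0 < 65536 := by
  by_cases hi : i < 256
  · rw [pv_tableN_getD i hi]
    exact pv_iter_lt _ _ (by rw [Nat.shiftLeft_eq]; norm_num; omega)
  · unfold pvTableN
    have hn : (List.range 256)[i]? = none := by simp; omega
    rw [List.getD_eq_getElem?_getD, List.getElem?_map, hn]
    norm_num

theorem pv_strideN_lt (x : Nat) : pvStrideN x < 65536 := by
  unfold pvStrideN
  have h1 : (x <<< 8) &&& 0xFFFF < 2 ^ 16 := by
    have : (x <<< 8) &&& 0xFFFF ≤ 65535 := Nat.and_le_right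
    omega
  have h2 : pvTableN.getD ((x >>> 8) &&& 0xFF) 0 < 2 ^ 16 := by
    have := pv_tableN_lt ((x >>> 8) &&& 0xFF)
    omega
  have := Nat.xor_lt_two_pow h1 h2
  omega

theorem pv_stride_bridge (a : Int) :
    PySem.Int.band
        (PySem.Int.bxor (a <<< (8:Nat)) (pvTable.getD (PySem.Int.band (a >>> (8:Nat)) 0xFF).toNat 0))
        0xFFFF = ((pvStrideN ((a % 65536).toNat) : Nat) : Int) := by
  have hidx : (PySem.Int.band (a >>> (8:Nat)) 0xFF).toNat = ((a % 65536).toNat >>> 8) &&& 0xFF := by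
    rw [pv_band_ff]
    have hs : a >>> (8:Nat) = a / 256 := by
      rw [Int.shiftRight_eq_div_pow]; norm_num
    have hn : (a % 65536).toNat >>> 8 = (a % 65536).toNat / 256 := by
      rw [Nat.shiftRight_eq_div_pow]
    have hm : ((a % 65536).toNat / 256) &&& 255 = ((a % 65536).toNat / 256) % 256 := by
      have := Nat.and_two_pow_sub_one_eq_mod ((a % 65536).toNat / 256) 8
      norm_num at this; exact this
    rw [hs, hn]
    norm_num at hm ⊢
    rw [hm]
    omega
  rw [hidx, pv_table_cast,
    pv_bxor_band _ _ (pv_tableN_lt _)]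
  unfold pvStrideN
  congr 1
  have h8 : ((a <<< (8:Nat)) % 65536).toNat = ((a % 65536).toNat <<< 8) &&& 65535 := by
    have h1 : a <<< (8:Nat) = a * 256 := by rw [Int.shiftLeft_eq]; norm_num
    have h2 : (a % 65536).toNat <<< 8 = (a % 65536).toNat * 256 := by
      rw [Nat.shiftLeft_eq]
    have h3 : (a % 65536).toNat * 256 &&& 65535 = (a % 65536).toNat * 256 % 65536 := by
      have := Nat.and_two_pow_sub_one_eq_mod ((a % 65536).toNat * 256) 16
      norm_num at this; exact this
    rw [h1, h2, h3]
    omega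
  rw [h8]

theorem pv_stride_fold_bridge (a : Int) :
    (List.range 2).foldl (fun key _ =>
        PySem.Int.band
          (PySem.Int.bxor (key <<< (8:Nat)) (pvTable.getD (PySem.Int.band (key >>> (8:Nat)) 0xFF).toNat 0))
          0xFFFF) a = ((pvStrideN (pvStrideN ((a % 65536).toNat)) : Nat) : Int) := by
  rw [show List.range 2 = [0, 1] from rfl]
  simp only [List.foldl_cons, List.foldl_nil]
  rw [pv_stride_bridge, pv_stride_bridge]
  congr 2
  have := pv_strideN_lt ((a % 65536).toNat)
  omega

theorem pv_stride_eq_iter8 (x : Nat) (hx : x < 65536) : pvStrideN x = pvStepN^[8] x := by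
  have hhi : x >>> 8 < 256 := by
    rw [Nat.shiftRight_eq_div_pow]; norm_num; omega
  have hhm : (x >>> 8) &&& 255 = x >>> 8 := by
    have := Nat.and_two_pow_sub_one_eq_mod (x >>> 8) 8
    norm_num at this ⊢; omega
  have hlo : x &&& 255 < 256 := Nat.lt_succ_of_le Nat.and_le_right
  have hmask : (x <<< 8) &&& 65535 = (x &&& 255) <<< 8 := by
    have e1 : x &&& 255 = x % 256 := by
      have := Nat.and_two_pow_sub_one_eq_mod x 8
      norm_num at this; exact this
    have e2 : (x <<< 8) &&& 65535 = x * 256 % 65536 := by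
      rw [Nat.shiftLeft_eq]
      have := Nat.and_two_pow_sub_one_eq_mod (x * 256) 16
      norm_num at this ⊢; exact this
    rw [e2, e1, Nat.shiftLeft_eq]
    norm_num
    omega
  unfold pvStrideN
  rw [hhm, pv_tableN_getD _ hhi, hmask]
  conv_rhs => rw [pv_decompose x hx]
  rw [pv_iterj_linear, pv_low_byte _ hlo, Nat.xor_comm]

-- ===== VERDICT (by name: the statement is the Claim_ definition above) =====
theorem candidate_6_spec : Claim_equal_candidate_6 := by
  intro seed _
  unfold Spec_candidate_6 candidate_6 candidate_6_alt
  rw [pv_fold_bridge 16 (by omega) seed, pv_stride_fold_bridge seed]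
  have hr : (seed % 65536).toNat < 65536 := by omega
  rw [pv_stride_eq_iter8 _ hr, pv_stride_eq_iter8 _ (pv_iter_lt 8 _ hr)]
  rw [← Function.iterate_add_apply]
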